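-- pv_equiv track=rewrite | github.com/yuhua0731/Explore_leet | solution.py | possibleToStamp
-- ===== SOURCE A (Python) =====
-- from typing import List
-- from itertools import chain, product
--
-- def possibleToStamp(grid: List[List[int]], stampHeight: int, stampWidth: int) -> bool:
--     m, n = len(grid), len(grid[0])
--     H, W = stampHeight, stampWidth
--
--     def acc_2d(grid):
--         dp = [[0] * (n + 1) for _ in range(m + 1)]
--         for c, r in product(range(n), range(m)):
--             dp[r + 1][c + 1] = dp[r + 1][c] + \
--                 dp[r][c + 1] - dp[r][c] + grid[r][c]
--         return dp
--
--     def sumRegion(mat, r1, c1, r2, c2):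
--         return mat[r2 + 1][c2 + 1] - mat[r1][c2 + 1] - mat[r2 + 1][c1] + mat[r1][c1]
--
--     dp = acc_2d(grid)
--     stamp_grid = [[0] * n for _ in range(m)]
--     for r, c in product(range(m - H + 1), range(n - W + 1)):
--         if sumRegion(dp, r, c, r + H - 1, c + W - 1) == 0:
--             # all cells in this range are empty
--             # just mark the right-bottom corner cell with 1
--             stamp_grid[r + H - 1][c + W - 1] = 1
--
--     stamp_prefix = acc_2d(stamp_grid)
--     for r, c in product(range(m), range(n)):
--         # cell is empty and cannot be a right-bottom corner of a stamp
--         if grid[r][c] == 0 and stamp_grid[r][c] == 0: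
--             if sumRegion(stamp_prefix, r, c,
--                          min(r + H - 1, m - 1),
--                          min(c + W - 1, n - 1)) == 0:
--                 # this cell cannot be covered by any valid right-bottom corner
--                 return False
--     return True
-- ===== SOURCE B (Python) =====
-- from typing import List
--
--
-- def possibleToStamp(grid: List[List[int]], stampHeight: int, stampWidth: int) -> bool:
--     m, n = len(grid), len(grid[0])
--     H, W = stampHeight, stampWidth
--
--     def prefix2d(mat, rows, cols):
--         # separable 2D prefix sums: running sum along each row, added to the row above
--         pre = [[0] * (cols + 1) for _ in range(rows + 1)]
--         for r in range(rows):
--             run = 0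
--             for c in range(cols):
--                 run += mat[r][c]
--                 pre[r + 1][c + 1] = pre[r][c + 1] + run
--         return pre
--
--     pre = prefix2d(grid, m, n)
--     # 2D difference array: +/- at the four corners of every valid stamp placement
--     diff = [[0] * (n + 1) for _ in range(m + 1)]
--     for i in range(m - H + 1):
--         for j in range(n - W + 1):
--             if pre[i + H][j + W] - pre[i][j + W] - pre[i + H][j] + pre[i][j] == 0:
--                 diff[i][j] += 1
--                 diff[i][j + W] -= 1
--                 diff[i + H][j] -= 1
--                 diff[i + H][j + W] += 1
--     # accumulating the difference array counts, per cell, the placements covering it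
--     cov = prefix2d(diff, m + 1, n + 1)
--     for r in range(m):
--         for c in range(n):
--             if grid[r][c] == 0 and cov[r + 1][c + 1] == 0:
--                 return False
--     return True
-- ===== Notes on version B (the rewrite author's own statement) =====
-- stated objective: alternative
-- what changed: B computes the grid prefix sums separably (row running sums added to the previous prefix row), and replaces A's corner-marking grid plus second prefix-sum with per-cell clamped window queries by a 2D difference array updated at the four corners of each valid placement, whose accumulation gives a per-cell coverage count checked directly.
-- outside the precondition, e.g. on possibleToStamp([[0]], 0, 1): A returns True, B returns False
import Mathlib
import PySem

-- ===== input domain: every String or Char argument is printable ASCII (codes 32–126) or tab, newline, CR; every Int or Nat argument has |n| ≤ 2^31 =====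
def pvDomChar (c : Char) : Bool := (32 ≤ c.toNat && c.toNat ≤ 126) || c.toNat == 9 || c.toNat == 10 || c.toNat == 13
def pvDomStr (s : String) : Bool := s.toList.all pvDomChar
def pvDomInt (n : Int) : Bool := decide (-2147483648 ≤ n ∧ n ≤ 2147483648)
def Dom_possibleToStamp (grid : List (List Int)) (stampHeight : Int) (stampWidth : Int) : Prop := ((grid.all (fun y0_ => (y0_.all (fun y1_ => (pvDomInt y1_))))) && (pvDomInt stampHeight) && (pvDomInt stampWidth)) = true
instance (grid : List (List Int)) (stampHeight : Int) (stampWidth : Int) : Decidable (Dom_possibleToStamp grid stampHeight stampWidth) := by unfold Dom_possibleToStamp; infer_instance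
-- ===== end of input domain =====

-- B replaces A's corner-marking grid + second prefix-sum + clamped window queries by a separable
-- prefix sum and a 2D difference array accumulated into per-cell coverage counts (objective: alternative).
-- Python list-of-list matrices are ported as List (List Int) with pvGet/pvSet (read / write one cell);
-- each Python loop is the corresponding foldl over the same range, writing the same cells in the same order.

-- matrix cell read `mat[x][y]` (total; inside Pre_ every read is in range)
def pvGet (mat : List (List Int)) (x y : Nat) : Int := (mat.getD x []).getD y 0

-- matrix cell write `mat[i][j] = v`
def pvSet (mat : List (List Int)) (i j : Nat) (v : Int) : List (List Int) :=
  mat.set i ((mat.getD i []).set j v)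

-- `[[0] * C for _ in range(R)]`
def pvZeros (R C : Nat) : List (List Int) := List.replicate R (List.replicate C 0)

-- ===== PORT A =====

-- A's acc_2d: iterates product(range(n), range(m)) (column-major), inclusion-exclusion recurrence
def pvAcc2d (mat : List (List Int)) (M N : Nat) : List (List Int) :=
  (List.range N).foldl
    (fun dp c =>
      (List.range M).foldl
        (fun dp r => pvSet dp (r+1) (c+1)
          (pvGet dp (r+1) c + pvGet dp r (c+1) - pvGet dp r c + pvGet mat r c))
        dp)
    (pvZeros (M+1) (N+1))

-- A's sumRegion
def pvSumRegion (mat : List (List Int)) (r1 c1 r2 c2 : Nat) : Int :=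
  pvGet mat (r2+1) (c2+1) - pvGet mat r1 (c2+1) - pvGet mat (r2+1) c1 + pvGet mat r1 c1

def possibleToStamp (grid : List (List Int)) (stampHeight : Int) (stampWidth : Int) : Bool :=
  let m := grid.length
  let n := (grid.headD []).length
  let Hn := stampHeight.toNat
  let Wn := stampWidth.toNat
  let dp := pvAcc2d grid m n
  let stamp :=
    (List.range (m + 1 - Hn)).foldl
      (fun s r =>
        (List.range (n + 1 - Wn)).foldl
          (fun s c =>
            if pvSumRegion dp r c (r + Hn - 1) (c + Wn - 1) = 0 then
              pvSet s (r + Hn - 1) (c + Wn - 1) 1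
            else s)
          s)
      (pvZeros m n)
  let sp := pvAcc2d stamp m n
  -- the early `return False` is encoded as the failing conjunct of `all`
  (List.range m).all fun r => (List.range n).all fun c =>
    !(pvGet grid r c == 0 && pvGet stamp r c == 0 &&
      pvSumRegion sp r c (min (r + Hn - 1) (m - 1)) (min (c + Wn - 1) (n - 1)) == 0)

-- ===== PORT B =====

-- B's prefix2d: running sum along each row added to the previous prefix row
def pvSepPre (mat : List (List Int)) (M N : Nat) : List (List Int) :=
  (List.range M).foldl
    (fun p r =>
      ((List.range N).foldl
        (fun (st : List (List Int) × Int) c =>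
          let run := st.2 + pvGet mat r c
          (pvSet st.1 (r+1) (c+1) (pvGet st.1 r (c+1) + run), run))
        (p, 0)).1)
    (pvZeros (M+1) (N+1))

def possibleToStamp_alt (grid : List (List Int)) (stampHeight : Int) (stampWidth : Int) : Bool :=
  let m := grid.length
  let n := (grid.headD []).length
  let Hn := stampHeight.toNat
  let Wn := stampWidth.toNat
  let pre := pvSepPre grid m n
  let diff :=
    (List.range (m + 1 - Hn)).foldl
      (fun d i =>
        (List.range (n + 1 - Wn)).foldl
          (fun d j =>
            if pvGet pre (i+Hn) (j+Wn) - pvGet pre i (j+Wn) -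
                pvGet pre (i+Hn) j + pvGet pre i j = 0 then
              let d1 := pvSet d i j (pvGet d i j + 1)
              let d2 := pvSet d1 i (j+Wn) (pvGet d1 i (j+Wn) - 1)
              let d3 := pvSet d2 (i+Hn) j (pvGet d2 (i+Hn) j - 1)
              pvSet d3 (i+Hn) (j+Wn) (pvGet d3 (i+Hn) (j+Wn) + 1)
            else d)
          d)
      (pvZeros (m+1) (n+1))
  let cov := pvSepPre diff (m+1) (n+1)
  (List.range m).all fun r => (List.range n).all fun c =>
    !(pvGet grid r c == 0 && pvGet cov (r+1) (c+1) == 0)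

-- ===== PRECONDITION & SPEC =====
-- Python A raises IndexError on an empty grid and on rows shorter than the first row.
-- Pre_ also excludes nonpositive stampHeight/stampWidth: there A still returns, but its value is an
-- accident of Python's negative-index wraparound when marking corners, a corner no caller specifies
-- (e.g. ([[0]], 0, 1): A returns True, B returns False).
def Pre_possibleToStamp (grid : List (List Int)) (stampHeight : Int) (stampWidth : Int) : Prop :=
  grid ≠ [] ∧ (∀ row ∈ grid, (grid.headD []).length ≤ row.length) ∧
    1 ≤ stampHeight ∧ 1 ≤ stampWidth
instance (grid : List (List Int)) (stampHeight : Int) (stampWidth : Int) : Decidable (Pre_possibleToStamp grid stampHeight stampWidth) := by unfold Pre_possibleToStamp; infer_instance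

def pvWitness_possibleToStamp : List (List Int) × Int × Int := ([[0, 1], [0, 0]], 1, 2)

def Spec_possibleToStamp (grid : List (List Int)) (stampHeight : Int) (stampWidth : Int) (out : Bool) : Prop := out = possibleToStamp_alt grid stampHeight stampWidth
instance (grid : List (List Int)) (stampHeight : Int) (stampWidth : Int) (out : Bool) : Decidable (Spec_possibleToStamp grid stampHeight stampWidth out) := by unfold Spec_possibleToStamp; infer_instance

-- ===== CLAIM (what is proved, stated in full; the proofs are below) =====
def Claim_equal_possibleToStamp : Prop := ∀ (grid : List (List Int)) (stampHeight : Int) (stampWidth : Int), Dom_possibleToStamp grid stampHeight stampWidth → Pre_possibleToStamp grid stampHeight stampWidth → Spec_possibleToStamp grid stampHeight stampWidth (possibleToStamp grid stampHeight stampWidth)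

-- ===== LEMMAS AND PROOFS =====

-- 2D prefix sum (the common mathematical value both ports' tables hold)
def pvP (a : Nat → Nat → Int) (x y : Nat) : Int :=
  ∑ i ∈ Finset.range x, ∑ j ∈ Finset.range y, a i j

-- separable single-placement contribution of B's four-corner increments
def pvDelta (Hn Wn i j x y : Nat) : Int :=
  ((if x = i then (1:Int) else 0) - (if x = i + Hn then 1 else 0)) *
  ((if y = j then (1:Int) else 0) - (if y = j + Wn then 1 else 0))

-- shape of a matrix: R rows, each of length C
def pvShape (mat : List (List Int)) (R C : Nat) : Prop :=
  mat.length = R ∧ ∀ x, x < R → (mat.getD x []).length = C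

lemma pvRow_set (mat : List (List Int)) (i : Nat) (row : List Int) (x : Nat) :
    (mat.set i row).getD x [] = if x = i ∧ i < mat.length then row else mat.getD x [] := by
  rw [List.getD_eq_getElem?_getD, List.getD_eq_getElem?_getD, List.getElem?_set]
  by_cases hx : x = i
  · subst hx
    by_cases hl : x < mat.length
    · rw [if_pos rfl, if_pos hl, if_pos ⟨rfl, hl⟩]
      rfl
    · rw [if_pos rfl, if_neg hl, if_neg (by tauto), List.getElem?_eq_none (by omega)]
  · rw [if_neg (fun h => hx h.symm), if_neg (fun h => hx h.1)]

lemma pvShape_set {mat : List (List Int)} {R C : Nat} (i j : Nat) (v : Int)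
    (h : pvShape mat R C) : pvShape (pvSet mat i j v) R C := by
  constructor
  · rw [pvSet, List.length_set]
    exact h.1
  · intro x hx
    rw [pvSet, pvRow_set]
    split_ifs with hc
    · obtain ⟨hxi, hil⟩ := hc
      subst hxi
      rw [List.length_set]
      exact h.2 x hx
    · exact h.2 x hx

lemma pvShape_zeros (R C : Nat) : pvShape (pvZeros R C) R C := by
  constructor
  · simp [pvZeros]
  · intro x hx
    rw [pvZeros, List.getD_eq_getElem?_getD, List.getElem?_replicate, if_pos hx]
    simp

lemma pvGet_zeros (R C x y : Nat) : pvGet (pvZeros R C) x y = 0 := by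
  unfold pvGet pvZeros
  by_cases hx : x < R
  · rw [show (List.replicate R (List.replicate C (0:Int))).getD x [] = List.replicate C 0 by
      rw [List.getD_eq_getElem?_getD, List.getElem?_replicate, if_pos hx]
      rfl]
    rw [List.getD_eq_getElem?_getD, List.getElem?_replicate]
    split_ifs <;> rfl
  · rw [show (List.replicate R (List.replicate C (0:Int))).getD x [] = [] by
      rw [List.getD_eq_getElem?_getD, List.getElem?_replicate, if_neg hx]
      rfl]
    rfl

lemma pvGet_set (mat : List (List Int)) (i j : Nat) (v : Int)
    (hi : i < mat.length) (hj : j < (mat.getD i []).length) (x y : Nat) :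
    pvGet (pvSet mat i j v) x y = if x = i ∧ y = j then v else pvGet mat x y := by
  unfold pvGet pvSet
  rw [pvRow_set]
  by_cases hx : x = i
  · subst hx
    rw [if_pos ⟨rfl, hi⟩, List.getD_eq_getElem?_getD, List.getElem?_set]
    by_cases hy : y = j
    · subst hy
      rw [if_pos rfl, if_pos hj, if_pos ⟨rfl, rfl⟩]
      rfl
    · rw [if_neg (fun h => hy h.symm), if_neg (fun h => hy h.2)]
      simp [List.getD_eq_getElem?_getD]
  · rw [if_neg (fun h => hx h.1), if_neg (fun h => hx h.1)]

lemma pvP_zero_left (a : Nat → Nat → Int) (y : Nat) : pvP a 0 y = 0 := by simp [pvP]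

lemma pvP_zero_right (a : Nat → Nat → Int) (x : Nat) : pvP a x 0 = 0 := by simp [pvP]

lemma pvP_row (a : Nat → Nat → Int) (x y : Nat) :
    pvP a (x+1) y = pvP a x y + ∑ j ∈ Finset.range y, a x j := by
  simp [pvP, Finset.sum_range_succ]

lemma pvP_corner (a : Nat → Nat → Int) (x y : Nat) :
    pvP a (x+1) (y+1) = pvP a (x+1) y + pvP a x (y+1) - pvP a x y + a x y := by
  simp only [pvP_row]
  rw [Finset.sum_range_succ]
  ring

lemma accInner_eq (mat : List (List Int)) (M N c : Nat) (hc : c < N) (dp : List (List Int))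
    (hsh : pvShape dp (M+1) (N+1))
    (hdp : ∀ x y, pvGet dp x y = if x ≤ M ∧ y ≤ c then pvP (pvGet mat) x y else 0) :
    ∀ t, t ≤ M →
      pvShape ((List.range t).foldl
        (fun dp r => pvSet dp (r+1) (c+1)
          (pvGet dp (r+1) c + pvGet dp r (c+1) - pvGet dp r c + pvGet mat r c)) dp) (M+1) (N+1)
      ∧ ∀ x y,
        pvGet ((List.range t).foldl
          (fun dp r => pvSet dp (r+1) (c+1)
            (pvGet dp (r+1) c + pvGet dp r (c+1) - pvGet dp r c + pvGet mat r c)) dp) x y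
        = if (x ≤ M ∧ y ≤ c) ∨ (x ≤ t ∧ y = c + 1) then pvP (pvGet mat) x y else 0 := by
  intro t
  induction t with
  | zero =>
    intro _
    refine ⟨by simpa using hsh, ?_⟩
    intro x y
    simp only [List.range_zero, List.foldl_nil]
    rw [hdp x y]
    by_cases h1 : x ≤ M ∧ y ≤ c
    · rw [if_pos h1, if_pos (Or.inl h1)]
    · by_cases h2 : x ≤ 0 ∧ y = c + 1
      · rw [if_neg h1, if_pos (Or.inr h2)]
        have hx0 : x = 0 := by omega
        subst hx0
        rw [pvP_zero_left]
      · rw [if_neg h1, if_neg (by omega)]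
  | succ t ih =>
    intro ht
    have ht' : t ≤ M := by omega
    obtain ⟨ihs, ihv⟩ := ih ht'
    rw [List.range_succ, List.foldl_append, List.foldl_cons, List.foldl_nil]
    refine ⟨pvShape_set _ _ _ ihs, ?_⟩
    intro x y
    rw [pvGet_set _ _ _ _ (by rw [ihs.1]; omega) (by rw [ihs.2 (t+1) (by omega)]; omega)]
    simp only [ihv]
    rw [if_pos (show (t+1 ≤ M ∧ c ≤ c) ∨ (t+1 ≤ t ∧ c = c + 1) by omega),
        if_pos (show (t ≤ M ∧ c + 1 ≤ c) ∨ (t ≤ t ∧ True) by simp),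
        if_pos (show (t ≤ M ∧ c ≤ c) ∨ (t ≤ t ∧ c = c + 1) by omega),
        ← pvP_corner]
    by_cases hxy : x = t + 1 ∧ y = c + 1
    · obtain ⟨hx, hy⟩ := hxy
      subst hx; subst hy
      rw [if_pos ⟨rfl, rfl⟩, if_pos (by omega)]
    · rw [if_neg hxy]
      by_cases hC : (x ≤ M ∧ y ≤ c) ∨ (x ≤ t ∧ y = c + 1)
      · rw [if_pos hC, if_pos (by omega)]
      · rw [if_neg hC, if_neg (by omega)]

lemma accOuter_eq (mat : List (List Int)) (M N : Nat) :
    ∀ u, u ≤ N →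
      pvShape ((List.range u).foldl
        (fun dp c => (List.range M).foldl
          (fun dp r => pvSet dp (r+1) (c+1)
            (pvGet dp (r+1) c + pvGet dp r (c+1) - pvGet dp r c + pvGet mat r c)) dp)
        (pvZeros (M+1) (N+1))) (M+1) (N+1)
      ∧ ∀ x y,
        pvGet ((List.range u).foldl
          (fun dp c => (List.range M).foldl
            (fun dp r => pvSet dp (r+1) (c+1)
              (pvGet dp (r+1) c + pvGet dp r (c+1) - pvGet dp r c + pvGet mat r c)) dp)
          (pvZeros (M+1) (N+1))) x y
        = if x ≤ M ∧ y ≤ u then pvP (pvGet mat) x y else 0 := by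
  intro u
  induction u with
  | zero =>
    intro _
    refine ⟨pvShape_zeros _ _, ?_⟩
    intro x y
    simp only [List.range_zero, List.foldl_nil]
    rw [pvGet_zeros]
    by_cases h : x ≤ M ∧ y ≤ 0
    · rw [if_pos h]
      have : y = 0 := by omega
      subst this
      rw [pvP_zero_right]
    · rw [if_neg h]
  | succ u ih =>
    intro hu
    obtain ⟨ihs, ihv⟩ := ih (by omega)
    rw [List.range_succ, List.foldl_append, List.foldl_cons, List.foldl_nil]
    obtain ⟨hs2, hv2⟩ := accInner_eq mat M N u (by omega) _ ihs ihv M le_rfl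
    refine ⟨hs2, ?_⟩
    intro x y
    rw [hv2 x y]
    by_cases h1 : (x ≤ M ∧ y ≤ u) ∨ (x ≤ M ∧ y = u + 1)
    · rw [if_pos h1, if_pos (by omega)]
    · rw [if_neg h1, if_neg (by omega)]

lemma pvAcc2d_eq (mat : List (List Int)) (M N x y : Nat) (hx : x ≤ M) (hy : y ≤ N) :
    pvGet (pvAcc2d mat M N) x y = pvP (pvGet mat) x y := by
  unfold pvAcc2d
  rw [(accOuter_eq mat M N N le_rfl).2 x y, if_pos ⟨hx, hy⟩]

lemma sepInner_eq (mat : List (List Int)) (M N r : Nat) (hr : r < M) (p : List (List Int))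
    (hsh : pvShape p (M+1) (N+1))
    (hp : ∀ x y, pvGet p x y = if x ≤ r ∧ y ≤ N then pvP (pvGet mat) x y else 0) :
    ∀ t, t ≤ N →
      pvShape ((List.range t).foldl
        (fun (st : List (List Int) × Int) c =>
          let run := st.2 + pvGet mat r c
          (pvSet st.1 (r+1) (c+1) (pvGet st.1 r (c+1) + run), run)) (p, 0)).1 (M+1) (N+1)
      ∧ (∀ x y,
          pvGet ((List.range t).foldl
            (fun (st : List (List Int) × Int) c =>
              let run := st.2 + pvGet mat r c
              (pvSet st.1 (r+1) (c+1) (pvGet st.1 r (c+1) + run), run)) (p, 0)).1 x y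
          = if (x ≤ r ∧ y ≤ N) ∨ (x = r + 1 ∧ y ≤ t) then pvP (pvGet mat) x y else 0)
      ∧ ((List.range t).foldl
          (fun (st : List (List Int) × Int) c =>
            let run := st.2 + pvGet mat r c
            (pvSet st.1 (r+1) (c+1) (pvGet st.1 r (c+1) + run), run)) (p, 0)).2
        = ∑ j ∈ Finset.range t, pvGet mat r j := by
  intro t
  induction t with
  | zero =>
    intro _
    refine ⟨by simpa using hsh, ?_, by simp⟩
    intro x y
    simp only [List.range_zero, List.foldl_nil]
    rw [hp x y]
    by_cases h1 : x ≤ r ∧ y ≤ N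
    · rw [if_pos h1, if_pos (Or.inl h1)]
    · by_cases h2 : x = r + 1 ∧ y ≤ 0
      · rw [if_neg h1, if_pos (Or.inr h2)]
        obtain ⟨hx, hy⟩ := h2
        have hy0 : y = 0 := by omega
        subst hx; subst hy0
        rw [pvP_zero_right]
      · rw [if_neg h1, if_neg (by omega)]
  | succ t ih =>
    intro ht
    have ht' : t ≤ N := by omega
    obtain ⟨ihs, ihv, ihr⟩ := ih ht'
    rw [List.range_succ, List.foldl_append, List.foldl_cons, List.foldl_nil]
    dsimp only
    refine ⟨pvShape_set _ _ _ ihs, ?_, by rw [ihr, Finset.sum_range_succ]⟩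
    intro x y
    rw [pvGet_set _ _ _ _ (by rw [ihs.1]; omega) (by rw [ihs.2 (r+1) (by omega)]; omega)]
    simp only [ihv, ihr]
    rw [if_pos (show (r ≤ r ∧ t + 1 ≤ N) ∨ (r = r + 1 ∧ t + 1 ≤ t) by omega)]
    rw [show pvP (pvGet mat) r (t+1) + ((∑ j ∈ Finset.range t, pvGet mat r j) + pvGet mat r t)
        = pvP (pvGet mat) (r+1) (t+1) by rw [pvP_row, Finset.sum_range_succ]]
    by_cases hxy : x = r + 1 ∧ y = t + 1
    · obtain ⟨hx, hy⟩ := hxy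
      subst hx; subst hy
      rw [if_pos ⟨rfl, rfl⟩, if_pos (by omega)]
    · rw [if_neg hxy]
      by_cases hC : (x ≤ r ∧ y ≤ N) ∨ (x = r + 1 ∧ y ≤ t)
      · rw [if_pos hC, if_pos (by omega)]
      · rw [if_neg hC, if_neg (by omega)]

lemma sepOuter_eq (mat : List (List Int)) (M N : Nat) :
    ∀ u, u ≤ M →
      pvShape ((List.range u).foldl
        (fun p r =>
          ((List.range N).foldl
            (fun (st : List (List Int) × Int) c =>
              let run := st.2 + pvGet mat r c
              (pvSet st.1 (r+1) (c+1) (pvGet st.1 r (c+1) + run), run))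
            (p, 0)).1)
        (pvZeros (M+1) (N+1))) (M+1) (N+1)
      ∧ ∀ x y,
        pvGet ((List.range u).foldl
          (fun p r =>
            ((List.range N).foldl
              (fun (st : List (List Int) × Int) c =>
                let run := st.2 + pvGet mat r c
                (pvSet st.1 (r+1) (c+1) (pvGet st.1 r (c+1) + run), run))
              (p, 0)).1)
          (pvZeros (M+1) (N+1))) x y
        = if x ≤ u ∧ y ≤ N then pvP (pvGet mat) x y else 0 := by
  intro u
  induction u with
  | zero =>
    intro _
    refine ⟨pvShape_zeros _ _, ?_⟩
    intro x y
    simp only [List.range_zero, List.foldl_nil]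
    rw [pvGet_zeros]
    by_cases h : x ≤ 0 ∧ y ≤ N
    · rw [if_pos h]
      have : x = 0 := by omega
      subst this
      rw [pvP_zero_left]
    · rw [if_neg h]
  | succ u ih =>
    intro hu
    obtain ⟨ihs, ihv⟩ := ih (by omega)
    rw [List.range_succ, List.foldl_append, List.foldl_cons, List.foldl_nil]
    obtain ⟨hs2, hv2, -⟩ := sepInner_eq mat M N u (by omega) _ ihs ihv N le_rfl
    refine ⟨hs2, ?_⟩
    intro x y
    rw [hv2 x y]
    by_cases h1 : (x ≤ u ∧ y ≤ N) ∨ (x = u + 1 ∧ y ≤ N)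
    · rw [if_pos h1, if_pos (by omega)]
    · rw [if_neg h1, if_neg (by omega)]

lemma pvSepPre_eq (mat : List (List Int)) (M N x y : Nat) (hx : x ≤ M) (hy : y ≤ N) :
    pvGet (pvSepPre mat M N) x y = pvP (pvGet mat) x y := by
  unfold pvSepPre
  rw [(sepOuter_eq mat M N M le_rfl).2 x y, if_pos ⟨hx, hy⟩]

lemma markInner_eq (dp : List (List Int)) (m n Hn Wn r : Nat) (hH : 1 ≤ Hn) (hW : 1 ≤ Wn)
    (hr : r + Hn ≤ m) :
    ∀ t, t ≤ n + 1 - Wn → ∀ s, pvShape s m n →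
      pvShape ((List.range t).foldl
        (fun s c => if pvSumRegion dp r c (r + Hn - 1) (c + Wn - 1) = 0 then
            pvSet s (r + Hn - 1) (c + Wn - 1) 1 else s) s) m n
      ∧ ∀ x y,
        pvGet ((List.range t).foldl
          (fun s c => if pvSumRegion dp r c (r + Hn - 1) (c + Wn - 1) = 0 then
              pvSet s (r + Hn - 1) (c + Wn - 1) 1 else s) s) x y
        = if (∃ c, c < t ∧ pvSumRegion dp r c (r + Hn - 1) (c + Wn - 1) = 0 ∧
                x = r + Hn - 1 ∧ y = c + Wn - 1) then 1 else pvGet s x y := by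
  intro t
  induction t with
  | zero =>
    intro _ s hs
    refine ⟨by simpa using hs, ?_⟩
    intro x y
    simp only [List.range_zero, List.foldl_nil]
    rw [if_neg (by rintro ⟨c0, hc0, -⟩; omega)]
  | succ t ih =>
    intro ht s hs
    obtain ⟨ihs, ihv⟩ := ih (by omega) s hs
    rw [List.range_succ, List.foldl_append, List.foldl_cons, List.foldl_nil]
    by_cases hc : pvSumRegion dp r t (r + Hn - 1) (t + Wn - 1) = 0
    · rw [if_pos hc]
      refine ⟨pvShape_set _ _ _ ihs, ?_⟩
      intro x y
      rw [pvGet_set _ _ _ _ (by rw [ihs.1]; omega)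
        (by rw [ihs.2 (r + Hn - 1) (by omega)]; omega)]
      rw [ihv x y]
      by_cases hxy : x = r + Hn - 1 ∧ y = t + Wn - 1
      · rw [if_pos hxy, if_pos ⟨t, by omega, hc, hxy.1, hxy.2⟩]
      · rw [if_neg hxy]
        by_cases hE : ∃ c0, c0 < t ∧ pvSumRegion dp r c0 (r + Hn - 1) (c0 + Wn - 1) = 0 ∧
            x = r + Hn - 1 ∧ y = c0 + Wn - 1
        · obtain ⟨c0, h1, h2, h3, h4⟩ := hE
          rw [if_pos ⟨c0, h1, h2, h3, h4⟩, if_pos ⟨c0, by omega, h2, h3, h4⟩]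
        · rw [if_neg hE, if_neg ?_]
          rintro ⟨c0, hlt, h2, h3, h4⟩
          rcases Nat.lt_succ_iff_lt_or_eq.mp hlt with h | h
          · exact hE ⟨c0, h, h2, h3, h4⟩
          · subst h; exact hxy ⟨h3, h4⟩
    · rw [if_neg hc]
      refine ⟨ihs, ?_⟩
      intro x y
      rw [ihv x y]
      by_cases hE : ∃ c0, c0 < t ∧ pvSumRegion dp r c0 (r + Hn - 1) (c0 + Wn - 1) = 0 ∧
          x = r + Hn - 1 ∧ y = c0 + Wn - 1
      · obtain ⟨c0, h1, h2, h3, h4⟩ := hE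
        rw [if_pos ⟨c0, h1, h2, h3, h4⟩, if_pos ⟨c0, by omega, h2, h3, h4⟩]
      · rw [if_neg hE, if_neg ?_]
        rintro ⟨c0, hlt, h2, h3, h4⟩
        rcases Nat.lt_succ_iff_lt_or_eq.mp hlt with h | h
        · exact hE ⟨c0, h, h2, h3, h4⟩
        · subst h; exact hc h2

lemma markOuter_eq (dp : List (List Int)) (m n Hn Wn : Nat) (hH : 1 ≤ Hn) (hW : 1 ≤ Wn) :
    ∀ u, u ≤ m + 1 - Hn →
      pvShape ((List.range u).foldl
        (fun s r => (List.range (n + 1 - Wn)).foldl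
          (fun s c => if pvSumRegion dp r c (r + Hn - 1) (c + Wn - 1) = 0 then
              pvSet s (r + Hn - 1) (c + Wn - 1) 1 else s) s)
        (pvZeros m n)) m n
      ∧ ∀ x y,
        pvGet ((List.range u).foldl
          (fun s r => (List.range (n + 1 - Wn)).foldl
            (fun s c => if pvSumRegion dp r c (r + Hn - 1) (c + Wn - 1) = 0 then
                pvSet s (r + Hn - 1) (c + Wn - 1) 1 else s) s)
          (pvZeros m n)) x y
        = if (∃ i, i < u ∧ ∃ j, j < n + 1 - Wn ∧
                pvSumRegion dp i j (i + Hn - 1) (j + Wn - 1) = 0 ∧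
                x = i + Hn - 1 ∧ y = j + Wn - 1) then 1 else 0 := by
  intro u
  induction u with
  | zero =>
    intro _
    refine ⟨pvShape_zeros _ _, ?_⟩
    intro x y
    simp only [List.range_zero, List.foldl_nil]
    rw [pvGet_zeros, if_neg (by rintro ⟨i0, hi0, -⟩; omega)]
  | succ u ih =>
    intro hu
    obtain ⟨ihs, ihv⟩ := ih (by omega)
    rw [List.range_succ, List.foldl_append, List.foldl_cons, List.foldl_nil]
    obtain ⟨hs2, hv2⟩ := markInner_eq dp m n Hn Wn u hH hW (by omega) (n + 1 - Wn) le_rfl _ ihs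
    refine ⟨hs2, ?_⟩
    intro x y
    rw [hv2 x y, ihv x y]
    by_cases hJ : ∃ j, j < n + 1 - Wn ∧ pvSumRegion dp u j (u + Hn - 1) (j + Wn - 1) = 0 ∧
        x = u + Hn - 1 ∧ y = j + Wn - 1
    · obtain ⟨j0, h1, h2, h3, h4⟩ := hJ
      rw [if_pos ⟨j0, h1, h2, h3, h4⟩, if_pos ⟨u, by omega, j0, h1, h2, h3, h4⟩]
    · rw [if_neg hJ]
      by_cases hI : ∃ i, i < u ∧ ∃ j, j < n + 1 - Wn ∧
          pvSumRegion dp i j (i + Hn - 1) (j + Wn - 1) = 0 ∧ x = i + Hn - 1 ∧ y = j + Wn - 1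
      · obtain ⟨i0, h1, j0, h2, h3, h4, h5⟩ := hI
        rw [if_pos ⟨i0, h1, j0, h2, h3, h4, h5⟩, if_pos ⟨i0, by omega, j0, h2, h3, h4, h5⟩]
      · rw [if_neg hI, if_neg ?_]
        rintro ⟨i0, hlt, j0, h2, h3, h4, h5⟩
        rcases Nat.lt_succ_iff_lt_or_eq.mp hlt with h | h
        · exact hI ⟨i0, h, j0, h2, h3, h4, h5⟩
        · subst h; exact hJ ⟨j0, h2, h3, h4, h5⟩

lemma foldl_addfun (R C : Nat) (step : List (List Int) → Nat → List (List Int))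
    (t : Nat → Nat → Nat → Int) :
    ∀ T, (∀ d k, k < T → pvShape d R C →
        pvShape (step d k) R C ∧ ∀ x y, pvGet (step d k) x y = pvGet d x y + t k x y) →
      ∀ d, pvShape d R C →
        pvShape ((List.range T).foldl step d) R C
        ∧ ∀ x y, pvGet ((List.range T).foldl step d) x y
            = pvGet d x y + ∑ k ∈ Finset.range T, t k x y := by
  intro T
  induction T with
  | zero =>
    intro _ d hd
    refine ⟨by simpa using hd, ?_⟩
    intro x y
    simp
  | succ T ih =>
    intro hstep d hd
    obtain ⟨ihs, ihv⟩ := ih (fun d k hk hsh => hstep d k (by omega) hsh) d hd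
    rw [List.range_succ, List.foldl_append, List.foldl_cons, List.foldl_nil]
    obtain ⟨hs2, hv2⟩ := hstep _ T (by omega) ihs
    refine ⟨hs2, ?_⟩
    intro x y
    rw [hv2 x y, ihv x y, Finset.sum_range_succ]
    ring

lemma chain_eq (d : List (List Int)) (m n Hn Wn i j : Nat) (hH : 1 ≤ Hn) (hW : 1 ≤ Wn)
    (hi : i + Hn ≤ m) (hj : j + Wn ≤ n) (hsh : pvShape d (m+1) (n+1)) :
    pvShape (let d1 := pvSet d i j (pvGet d i j + 1)
      let d2 := pvSet d1 i (j+Wn) (pvGet d1 i (j+Wn) - 1)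
      let d3 := pvSet d2 (i+Hn) j (pvGet d2 (i+Hn) j - 1)
      pvSet d3 (i+Hn) (j+Wn) (pvGet d3 (i+Hn) (j+Wn) + 1)) (m+1) (n+1)
    ∧ ∀ x y, pvGet (let d1 := pvSet d i j (pvGet d i j + 1)
      let d2 := pvSet d1 i (j+Wn) (pvGet d1 i (j+Wn) - 1)
      let d3 := pvSet d2 (i+Hn) j (pvGet d2 (i+Hn) j - 1)
      pvSet d3 (i+Hn) (j+Wn) (pvGet d3 (i+Hn) (j+Wn) + 1)) x y
      = pvGet d x y + pvDelta Hn Wn i j x y := by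
  dsimp only
  set d1 := pvSet d i j (pvGet d i j + 1)
  set d2 := pvSet d1 i (j+Wn) (pvGet d1 i (j+Wn) - 1)
  set d3 := pvSet d2 (i+Hn) j (pvGet d2 (i+Hn) j - 1)
  have hs1 : pvShape d1 (m+1) (n+1) := pvShape_set _ _ _ hsh
  have hs2 : pvShape d2 (m+1) (n+1) := pvShape_set _ _ _ hs1
  have hs3 : pvShape d3 (m+1) (n+1) := pvShape_set _ _ _ hs2
  have g1 : ∀ x' y', pvGet d1 x' y'
      = if x' = i ∧ y' = j then pvGet d i j + 1 else pvGet d x' y' :=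
    pvGet_set d i j (pvGet d i j + 1)
      (by rw [hsh.1]; omega) (by rw [hsh.2 i (by omega)]; omega)
  have g2 : ∀ x' y', pvGet d2 x' y'
      = if x' = i ∧ y' = j + Wn then pvGet d1 i (j+Wn) - 1 else pvGet d1 x' y' :=
    pvGet_set d1 i (j+Wn) (pvGet d1 i (j+Wn) - 1)
      (by rw [hs1.1]; omega) (by rw [hs1.2 i (by omega)]; omega)
  have g3 : ∀ x' y', pvGet d3 x' y'
      = if x' = i + Hn ∧ y' = j then pvGet d2 (i+Hn) j - 1 else pvGet d2 x' y' :=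
    pvGet_set d2 (i+Hn) j (pvGet d2 (i+Hn) j - 1)
      (by rw [hs2.1]; omega) (by rw [hs2.2 (i+Hn) (by omega)]; omega)
  have g4 : ∀ x' y', pvGet (pvSet d3 (i+Hn) (j+Wn) (pvGet d3 (i+Hn) (j+Wn) + 1)) x' y'
      = if x' = i + Hn ∧ y' = j + Wn then pvGet d3 (i+Hn) (j+Wn) + 1 else pvGet d3 x' y' :=
    pvGet_set d3 (i+Hn) (j+Wn) (pvGet d3 (i+Hn) (j+Wn) + 1)
      (by rw [hs3.1]; omega) (by rw [hs3.2 (i+Hn) (by omega)]; omega)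
  refine ⟨pvShape_set _ _ _ hs3, ?_⟩
  intro x y
  rcases eq_or_ne x i with hx1 | hx1 <;> rcases eq_or_ne x (i+Hn) with hx2 | hx2 <;>
    rcases eq_or_ne y j with hy1 | hy1 <;> rcases eq_or_ne y (j+Wn) with hy2 | hy2 <;>
    subst_vars <;>
    first
      | omega
      | (rw [g4]; simp only [g3, g2, g1, pvDelta]; split_ifs <;> first | omega | norm_num at *)

lemma diffFold_eq (pre : List (List Int)) (m n Hn Wn : Nat) (hH : 1 ≤ Hn) (hW : 1 ≤ Wn) :
    ∀ x y,
      pvGet ((List.range (m + 1 - Hn)).foldl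
        (fun d i =>
          (List.range (n + 1 - Wn)).foldl
            (fun d j =>
              if pvGet pre (i+Hn) (j+Wn) - pvGet pre i (j+Wn) -
                  pvGet pre (i+Hn) j + pvGet pre i j = 0 then
                let d1 := pvSet d i j (pvGet d i j + 1)
                let d2 := pvSet d1 i (j+Wn) (pvGet d1 i (j+Wn) - 1)
                let d3 := pvSet d2 (i+Hn) j (pvGet d2 (i+Hn) j - 1)
                pvSet d3 (i+Hn) (j+Wn) (pvGet d3 (i+Hn) (j+Wn) + 1)
              else d)
            d)
        (pvZeros (m+1) (n+1))) x y
      = ∑ i ∈ Finset.range (m + 1 - Hn), ∑ j ∈ Finset.range (n + 1 - Wn),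
          (if pvGet pre (i+Hn) (j+Wn) - pvGet pre i (j+Wn) -
              pvGet pre (i+Hn) j + pvGet pre i j = 0 then
            pvDelta Hn Wn i j x y else 0) := by
  intro x y
  have hin : ∀ i, i < m + 1 - Hn → ∀ (d : List (List Int)), pvShape d (m+1) (n+1) →
      pvShape ((List.range (n + 1 - Wn)).foldl
        (fun d j =>
          if pvGet pre (i+Hn) (j+Wn) - pvGet pre i (j+Wn) -
              pvGet pre (i+Hn) j + pvGet pre i j = 0 then
            let d1 := pvSet d i j (pvGet d i j + 1)
            let d2 := pvSet d1 i (j+Wn) (pvGet d1 i (j+Wn) - 1)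
            let d3 := pvSet d2 (i+Hn) j (pvGet d2 (i+Hn) j - 1)
            pvSet d3 (i+Hn) (j+Wn) (pvGet d3 (i+Hn) (j+Wn) + 1)
          else d) d) (m+1) (n+1)
      ∧ ∀ x y, pvGet ((List.range (n + 1 - Wn)).foldl
          (fun d j =>
            if pvGet pre (i+Hn) (j+Wn) - pvGet pre i (j+Wn) -
                pvGet pre (i+Hn) j + pvGet pre i j = 0 then
              let d1 := pvSet d i j (pvGet d i j + 1)
              let d2 := pvSet d1 i (j+Wn) (pvGet d1 i (j+Wn) - 1)
              let d3 := pvSet d2 (i+Hn) j (pvGet d2 (i+Hn) j - 1)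
              pvSet d3 (i+Hn) (j+Wn) (pvGet d3 (i+Hn) (j+Wn) + 1)
            else d) d) x y
        = pvGet d x y + ∑ j ∈ Finset.range (n + 1 - Wn),
            (if pvGet pre (i+Hn) (j+Wn) - pvGet pre i (j+Wn) -
                pvGet pre (i+Hn) j + pvGet pre i j = 0 then
              pvDelta Hn Wn i j x y else 0) := by
    intro i hi d hd
    refine foldl_addfun (m+1) (n+1) _
      (fun j x y => if pvGet pre (i+Hn) (j+Wn) - pvGet pre i (j+Wn) -
          pvGet pre (i+Hn) j + pvGet pre i j = 0 then pvDelta Hn Wn i j x y else 0)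
      (n + 1 - Wn) ?_ d hd
    intro d' j hj hshd
    dsimp only
    by_cases hc : pvGet pre (i+Hn) (j+Wn) - pvGet pre i (j+Wn) -
        pvGet pre (i+Hn) j + pvGet pre i j = 0
    · simp only [if_pos hc]
      exact chain_eq d' m n Hn Wn i j hH hW (by omega) (by omega) hshd
    · simp only [if_neg hc]
      exact ⟨hshd, fun x y => by ring⟩
  obtain ⟨-, hv⟩ := foldl_addfun (m+1) (n+1) _
    (fun i x y => ∑ j ∈ Finset.range (n + 1 - Wn),
      (if pvGet pre (i+Hn) (j+Wn) - pvGet pre i (j+Wn) -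
          pvGet pre (i+Hn) j + pvGet pre i j = 0 then pvDelta Hn Wn i j x y else 0))
    (m + 1 - Hn) (fun d i hi hd => hin i hi d hd) (pvZeros (m+1) (n+1)) (pvShape_zeros _ _)
  rw [hv x y, pvGet_zeros]
  ring

lemma delta_sum (Hn Wn i j R C : Nat) :
    ∑ x ∈ Finset.range R, ∑ y ∈ Finset.range C, pvDelta Hn Wn i j x y
    = ((if i < R then (1:Int) else 0) - (if i + Hn < R then 1 else 0)) *
      ((if j < C then (1:Int) else 0) - (if j + Wn < C then 1 else 0)) := by
  simp only [pvDelta]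
  rw [← Finset.sum_mul_sum]
  rw [Finset.sum_sub_distrib, Finset.sum_sub_distrib, Finset.sum_ite_eq', Finset.sum_ite_eq',
    Finset.sum_ite_eq', Finset.sum_ite_eq']
  simp [Finset.mem_range]

lemma pvP_region (a : Nat → Nat → Int) (r1 c1 R C : Nat) (h1 : r1 ≤ R) (h2 : c1 ≤ C) :
    pvP a R C - pvP a r1 C - pvP a R c1 + pvP a r1 c1
    = ∑ x ∈ Finset.Ico r1 R, ∑ y ∈ Finset.Ico c1 C, a x y := by
  have hrow : ∀ x, ∑ y ∈ Finset.Ico c1 C, a x y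
      = (∑ y ∈ Finset.range C, a x y) - ∑ y ∈ Finset.range c1, a x y := by
    intro x
    rw [Finset.sum_Ico_eq_sub _ h2]
  have hR : ∀ (w : Nat), pvP a R w - pvP a r1 w
      = ∑ x ∈ Finset.Ico r1 R, ∑ y ∈ Finset.range w, a x y := by
    intro w
    rw [Finset.sum_Ico_eq_sub _ h1]
    rfl
  calc pvP a R C - pvP a r1 C - pvP a R c1 + pvP a r1 c1
      = (pvP a R C - pvP a r1 C) - (pvP a R c1 - pvP a r1 c1) := by ring
    _ = (∑ x ∈ Finset.Ico r1 R, ∑ y ∈ Finset.range C, a x y)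
        - ∑ x ∈ Finset.Ico r1 R, ∑ y ∈ Finset.range c1, a x y := by rw [hR, hR]
    _ = ∑ x ∈ Finset.Ico r1 R, ((∑ y ∈ Finset.range C, a x y) - ∑ y ∈ Finset.range c1, a x y) := by
        rw [Finset.sum_sub_distrib]
    _ = ∑ x ∈ Finset.Ico r1 R, ∑ y ∈ Finset.Ico c1 C, a x y := by
        exact Finset.sum_congr rfl fun x _ => (hrow x).symm

-- the common placement-validity test (region sum of the stamp window is 0), in prefix-sum form
def pvTest (g : Nat → Nat → Int) (Hn Wn i j : Nat) : Prop :=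
  pvP g (i+Hn) (j+Wn) - pvP g i (j+Wn) - pvP g (i+Hn) j + pvP g i j = 0

-- "some valid placement covers cell (r,c)"
def pvE (g : Nat → Nat → Int) (m n Hn Wn r c : Nat) : Prop :=
  ∃ i, i < m + 1 - Hn ∧ ∃ j, j < n + 1 - Wn ∧ pvTest g Hn Wn i j ∧
    i ≤ r ∧ r < i + Hn ∧ j ≤ c ∧ c < j + Wn

-- A's corner-marking grid, as a named term
def pvStampF (mat : List (List Int)) (m n Hn Wn : Nat) : List (List Int) :=
  (List.range (m + 1 - Hn)).foldl
    (fun s r =>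
      (List.range (n + 1 - Wn)).foldl
        (fun s c =>
          if pvSumRegion (pvAcc2d mat m n) r c (r + Hn - 1) (c + Wn - 1) = 0 then
            pvSet s (r + Hn - 1) (c + Wn - 1) 1
          else s)
        s)
    (pvZeros m n)

-- B's difference array, as a named term
def pvDiffF (mat : List (List Int)) (m n Hn Wn : Nat) : List (List Int) :=
  (List.range (m + 1 - Hn)).foldl
    (fun d i =>
      (List.range (n + 1 - Wn)).foldl
        (fun d j =>
          if pvGet (pvSepPre mat m n) (i+Hn) (j+Wn) - pvGet (pvSepPre mat m n) i (j+Wn) -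
              pvGet (pvSepPre mat m n) (i+Hn) j + pvGet (pvSepPre mat m n) i j = 0 then
            let d1 := pvSet d i j (pvGet d i j + 1)
            let d2 := pvSet d1 i (j+Wn) (pvGet d1 i (j+Wn) - 1)
            let d3 := pvSet d2 (i+Hn) j (pvGet d2 (i+Hn) j - 1)
            pvSet d3 (i+Hn) (j+Wn) (pvGet d3 (i+Hn) (j+Wn) + 1)
          else d)
        d)
    (pvZeros (m+1) (n+1))

def pvCov (mat : List (List Int)) (m n Hn Wn : Nat) : List (List Int) :=
  pvSepPre (pvDiffF mat m n Hn Wn) (m+1) (n+1)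

lemma bool_eq_of_iff {a b : Bool} (h : a = true ↔ b = true) : a = b := by
  cases a <;> cases b <;> simp_all

lemma bnot_iff (a : Bool) : ((!a) = true) ↔ ¬ (a = true) := by cases a <;> simp

lemma ite_one_eq_zero {P : Prop} [Decidable P] : ((if P then (1:Int) else 0) = 0) ↔ ¬P := by
  split_ifs with h <;> simp [h]

lemma sum_swap4 (R C I J : Nat) (f : Nat → Nat → Nat → Nat → Int) :
    ∑ x ∈ Finset.range R, ∑ y ∈ Finset.range C, ∑ i ∈ Finset.range I, ∑ j ∈ Finset.range J, f x y i j
    = ∑ i ∈ Finset.range I, ∑ j ∈ Finset.range J, ∑ x ∈ Finset.range R, ∑ y ∈ Finset.range C, f x y i j := by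
  calc ∑ x ∈ Finset.range R, ∑ y ∈ Finset.range C, ∑ i ∈ Finset.range I, ∑ j ∈ Finset.range J, f x y i j
      = ∑ x ∈ Finset.range R, ∑ i ∈ Finset.range I, ∑ y ∈ Finset.range C, ∑ j ∈ Finset.range J, f x y i j :=
        Finset.sum_congr rfl fun x _ => Finset.sum_comm
    _ = ∑ i ∈ Finset.range I, ∑ x ∈ Finset.range R, ∑ y ∈ Finset.range C, ∑ j ∈ Finset.range J, f x y i j :=
        Finset.sum_comm
    _ = ∑ i ∈ Finset.range I, ∑ x ∈ Finset.range R, ∑ j ∈ Finset.range J, ∑ y ∈ Finset.range C, f x y i j :=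
        Finset.sum_congr rfl fun i _ => Finset.sum_congr rfl fun x _ => Finset.sum_comm
    _ = ∑ i ∈ Finset.range I, ∑ j ∈ Finset.range J, ∑ x ∈ Finset.range R, ∑ y ∈ Finset.range C, f x y i j :=
        Finset.sum_congr rfl fun i _ => Finset.sum_comm

-- A's placement test (on the acc_2d table) agrees with pvTest
lemma testA_iff (mat : List (List Int)) (m n Hn Wn i j : Nat) (hH : 1 ≤ Hn) (hW : 1 ≤ Wn)
    (hi : i < m + 1 - Hn) (hj : j < n + 1 - Wn) :
    (pvSumRegion (pvAcc2d mat m n) i j (i + Hn - 1) (j + Wn - 1) = 0)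
    ↔ pvTest (pvGet mat) Hn Wn i j := by
  unfold pvSumRegion pvTest
  rw [show i + Hn - 1 + 1 = i + Hn by omega, show j + Wn - 1 + 1 = j + Wn by omega]
  rw [pvAcc2d_eq mat m n (i+Hn) (j+Wn) (by omega) (by omega),
      pvAcc2d_eq mat m n i (j+Wn) (by omega) (by omega),
      pvAcc2d_eq mat m n (i+Hn) j (by omega) (by omega),
      pvAcc2d_eq mat m n i j (by omega) (by omega)]

-- B's placement test (on the separable prefix table) agrees with pvTest
lemma testB_iff (mat : List (List Int)) (m n Hn Wn i j : Nat) (hH : 1 ≤ Hn) (hW : 1 ≤ Wn)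
    (hi : i < m + 1 - Hn) (hj : j < n + 1 - Wn) :
    (pvGet (pvSepPre mat m n) (i+Hn) (j+Wn) - pvGet (pvSepPre mat m n) i (j+Wn) -
      pvGet (pvSepPre mat m n) (i+Hn) j + pvGet (pvSepPre mat m n) i j = 0)
    ↔ pvTest (pvGet mat) Hn Wn i j := by
  unfold pvTest
  rw [pvSepPre_eq mat m n (i+Hn) (j+Wn) (by omega) (by omega),
      pvSepPre_eq mat m n i (j+Wn) (by omega) (by omega),
      pvSepPre_eq mat m n (i+Hn) j (by omega) (by omega),
      pvSepPre_eq mat m n i j (by omega) (by omega)]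

lemma stampF_eq (mat : List (List Int)) (m n Hn Wn : Nat) (hH : 1 ≤ Hn) (hW : 1 ≤ Wn) (x y : Nat) :
    pvGet (pvStampF mat m n Hn Wn) x y
    = if (∃ i, i < m + 1 - Hn ∧ ∃ j, j < n + 1 - Wn ∧
        pvSumRegion (pvAcc2d mat m n) i j (i + Hn - 1) (j + Wn - 1) = 0 ∧
        x = i + Hn - 1 ∧ y = j + Wn - 1) then 1 else 0 := by
  unfold pvStampF
  exact (markOuter_eq (pvAcc2d mat m n) m n Hn Wn hH hW (m + 1 - Hn) le_rfl).2 x y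

-- A's per-cell check characterised by pvE
lemma cellA (mat : List (List Int)) (m n Hn Wn r c : Nat) (hH : 1 ≤ Hn) (hW : 1 ≤ Wn)
    (hr : r < m) (hc : c < n) :
    (pvGet (pvStampF mat m n Hn Wn) r c = 0 ∧
      pvSumRegion (pvAcc2d (pvStampF mat m n Hn Wn) m n) r c
        (min (r + Hn - 1) (m - 1)) (min (c + Wn - 1) (n - 1)) = 0)
    ↔ ¬ pvE (pvGet mat) m n Hn Wn r c := by
  have hnn : ∀ x y, 0 ≤ pvGet (pvStampF mat m n Hn Wn) x y := by
    intro x y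
    rw [stampF_eq mat m n Hn Wn hH hW]
    split_ifs <;> norm_num
  have hws : pvSumRegion (pvAcc2d (pvStampF mat m n Hn Wn) m n) r c
      (min (r + Hn - 1) (m - 1)) (min (c + Wn - 1) (n - 1))
      = ∑ x ∈ Finset.Ico r (min (r + Hn - 1) (m - 1) + 1),
          ∑ y ∈ Finset.Ico c (min (c + Wn - 1) (n - 1) + 1),
            pvGet (pvStampF mat m n Hn Wn) x y := by
    unfold pvSumRegion
    rw [pvAcc2d_eq _ m n (min (r + Hn - 1) (m - 1) + 1) (min (c + Wn - 1) (n - 1) + 1)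
          (by omega) (by omega),
        pvAcc2d_eq _ m n r (min (c + Wn - 1) (n - 1) + 1) (by omega) (by omega),
        pvAcc2d_eq _ m n (min (r + Hn - 1) (m - 1) + 1) c (by omega) (by omega),
        pvAcc2d_eq _ m n r c (by omega) (by omega),
        pvP_region _ r c (min (r + Hn - 1) (m - 1) + 1) (min (c + Wn - 1) (n - 1) + 1)
          (by omega) (by omega)]
  have hzero : (∑ x ∈ Finset.Ico r (min (r + Hn - 1) (m - 1) + 1),
        ∑ y ∈ Finset.Ico c (min (c + Wn - 1) (n - 1) + 1),
          pvGet (pvStampF mat m n Hn Wn) x y) = 0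
      ↔ ∀ x ∈ Finset.Ico r (min (r + Hn - 1) (m - 1) + 1),
          ∀ y ∈ Finset.Ico c (min (c + Wn - 1) (n - 1) + 1),
            pvGet (pvStampF mat m n Hn Wn) x y = 0 := by
    rw [Finset.sum_eq_zero_iff_of_nonneg (fun x _ => Finset.sum_nonneg (fun y _ => hnn x y))]
    exact forall_congr' fun x => imp_congr_right fun _ =>
      Finset.sum_eq_zero_iff_of_nonneg (fun y _ => hnn x y)
  constructor
  · rintro ⟨-, hsum⟩
    rw [hws, hzero] at hsum
    rintro ⟨i, hi, j, hj, ht, hir, hri, hjc, hcj⟩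
    have hmem := hsum (i + Hn - 1) (by rw [Finset.mem_Ico]; omega)
      (j + Wn - 1) (by rw [Finset.mem_Ico]; omega)
    rw [stampF_eq mat m n Hn Wn hH hW,
      if_pos ⟨i, hi, j, hj, (testA_iff mat m n Hn Wn i j hH hW hi hj).mpr ht, rfl, rfl⟩] at hmem
    exact one_ne_zero hmem
  · intro hnE
    have hall : ∀ x y, r ≤ x → x < min (r + Hn - 1) (m - 1) + 1 →
        c ≤ y → y < min (c + Wn - 1) (n - 1) + 1 → pvGet (pvStampF mat m n Hn Wn) x y = 0 := by
      intro x y hx1 hx2 hy1 hy2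
      rw [stampF_eq mat m n Hn Wn hH hW, if_neg ?_]
      rintro ⟨i, hi, j, hj, ht, hxx, hyy⟩
      exact hnE ⟨i, hi, j, hj, (testA_iff mat m n Hn Wn i j hH hW hi hj).mp ht,
        by omega, by omega, by omega, by omega⟩
    refine ⟨hall r c (by omega) (by omega) (by omega) (by omega), ?_⟩
    rw [hws, hzero]
    intro x hx y hy
    rw [Finset.mem_Ico] at hx hy
    exact hall x y hx.1 hx.2 hy.1 hy.2

-- B's per-cell coverage count characterised by pvE
lemma cellB (mat : List (List Int)) (m n Hn Wn r c : Nat) (hH : 1 ≤ Hn) (hW : 1 ≤ Wn)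
    (hr : r < m) (hc : c < n) :
    (pvGet (pvCov mat m n Hn Wn) (r+1) (c+1) = 0) ↔ ¬ pvE (pvGet mat) m n Hn Wn r c := by
  have hdiff := diffFold_eq (pvSepPre mat m n) m n Hn Wn hH hW
  unfold pvCov
  rw [pvSepPre_eq _ (m+1) (n+1) (r+1) (c+1) (by omega) (by omega)]
  unfold pvP pvDiffF
  rw [Finset.sum_congr rfl (fun x _ => Finset.sum_congr rfl (fun y _ => hdiff x y))]
  rw [sum_swap4]
  have hterm : ∀ i j, i < m + 1 - Hn → j < n + 1 - Wn →
      (∑ x ∈ Finset.range (r+1), ∑ y ∈ Finset.range (c+1),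
        (if pvGet (pvSepPre mat m n) (i+Hn) (j+Wn) - pvGet (pvSepPre mat m n) i (j+Wn) -
            pvGet (pvSepPre mat m n) (i+Hn) j + pvGet (pvSepPre mat m n) i j = 0 then
          pvDelta Hn Wn i j x y else 0))
      = if (pvGet (pvSepPre mat m n) (i+Hn) (j+Wn) - pvGet (pvSepPre mat m n) i (j+Wn) -
            pvGet (pvSepPre mat m n) (i+Hn) j + pvGet (pvSepPre mat m n) i j = 0) ∧
          i ≤ r ∧ r < i + Hn ∧ j ≤ c ∧ c < j + Wn then 1 else 0 := by
    intro i j hi hj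
    by_cases hv : pvGet (pvSepPre mat m n) (i+Hn) (j+Wn) - pvGet (pvSepPre mat m n) i (j+Wn) -
        pvGet (pvSepPre mat m n) (i+Hn) j + pvGet (pvSepPre mat m n) i j = 0
    · simp only [if_pos hv]
      rw [delta_sum]
      rw [if_congr (and_iff_right hv) rfl rfl]
      split_ifs <;> first | (exfalso; omega) | norm_num
    · simp only [if_neg hv]
      rw [if_neg (fun h => hv h.1)]
      simp
  rw [Finset.sum_congr rfl (fun i hi => Finset.sum_congr rfl (fun j hj =>
    hterm i j (Finset.mem_range.mp hi) (Finset.mem_range.mp hj)))]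
  have hzero : (∑ i ∈ Finset.range (m + 1 - Hn), ∑ j ∈ Finset.range (n + 1 - Wn),
        (if (pvGet (pvSepPre mat m n) (i+Hn) (j+Wn) - pvGet (pvSepPre mat m n) i (j+Wn) -
              pvGet (pvSepPre mat m n) (i+Hn) j + pvGet (pvSepPre mat m n) i j = 0) ∧
            i ≤ r ∧ r < i + Hn ∧ j ≤ c ∧ c < j + Wn then (1:Int) else 0)) = 0
      ↔ ∀ i ∈ Finset.range (m + 1 - Hn), ∀ j ∈ Finset.range (n + 1 - Wn),
          (if (pvGet (pvSepPre mat m n) (i+Hn) (j+Wn) - pvGet (pvSepPre mat m n) i (j+Wn) -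
              pvGet (pvSepPre mat m n) (i+Hn) j + pvGet (pvSepPre mat m n) i j = 0) ∧
            i ≤ r ∧ r < i + Hn ∧ j ≤ c ∧ c < j + Wn then (1:Int) else 0) = 0 := by
    rw [Finset.sum_eq_zero_iff_of_nonneg (fun i _ => Finset.sum_nonneg
      (fun j _ => by split_ifs <;> norm_num))]
    exact forall_congr' fun i => imp_congr_right fun _ =>
      Finset.sum_eq_zero_iff_of_nonneg (fun j _ => by split_ifs <;> norm_num)
  rw [hzero]
  constructor
  · rintro hz ⟨i, hi, j, hj, ht, h1, h2, h3, h4⟩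
    have hmem := hz i (Finset.mem_range.mpr hi) j (Finset.mem_range.mpr hj)
    rw [ite_one_eq_zero] at hmem
    exact hmem ⟨(testB_iff mat m n Hn Wn i j hH hW hi hj).mpr ht, h1, h2, h3, h4⟩
  · intro hnE i hi j hj
    rw [ite_one_eq_zero]
    rintro ⟨ht, h1, h2, h3, h4⟩
    exact hnE ⟨i, Finset.mem_range.mp hi, j, Finset.mem_range.mp hj,
      (testB_iff mat m n Hn Wn i j hH hW (Finset.mem_range.mp hi) (Finset.mem_range.mp hj)).mp ht,
      h1, h2, h3, h4⟩

lemma main_eq (mat : List (List Int)) (m n Hn Wn : Nat) (hH : 1 ≤ Hn) (hW : 1 ≤ Wn) :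
    ((List.range m).all fun r => (List.range n).all fun c =>
      !(pvGet mat r c == 0 && pvGet (pvStampF mat m n Hn Wn) r c == 0 &&
        pvSumRegion (pvAcc2d (pvStampF mat m n Hn Wn) m n) r c
          (min (r + Hn - 1) (m - 1)) (min (c + Wn - 1) (n - 1)) == 0))
    = ((List.range m).all fun r => (List.range n).all fun c =>
      !(pvGet mat r c == 0 && pvGet (pvCov mat m n Hn Wn) (r+1) (c+1) == 0)) := by
  apply bool_eq_of_iff
  simp only [List.all_eq_true, List.mem_range]
  refine forall_congr' fun r => imp_congr_right fun hr => ?_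
  refine forall_congr' fun c => imp_congr_right fun hc => ?_
  rw [bnot_iff, bnot_iff]
  refine not_congr ?_
  simp only [Bool.and_eq_true, beq_iff_eq]
  have hA := cellA mat m n Hn Wn r c hH hW hr hc
  have hB := cellB mat m n Hn Wn r c hH hW hr hc
  constructor
  · rintro ⟨⟨h0, h1⟩, h2⟩
    exact ⟨h0, hB.mpr (hA.mp ⟨h1, h2⟩)⟩
  · rintro ⟨h0, h1⟩
    obtain ⟨ha, hb⟩ := hA.mpr (hB.mp h1)
    exact ⟨⟨h0, ha⟩, hb⟩

-- ===== VERDICT (by name: the statement is the Claim_ definition above) =====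
theorem possibleToStamp_spec : Claim_equal_possibleToStamp := by
  intro grid sH sW _ hpre
  obtain ⟨hne, -, hH, hW⟩ := hpre
  have hH1 : 1 ≤ sH.toNat := by omega
  have hW1 : 1 ≤ sW.toNat := by omega
  unfold Spec_possibleToStamp possibleToStamp possibleToStamp_alt
  exact main_eq grid grid.length (grid.headD []).length sH.toNat sW.toNat hH1 hW1
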